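-- pv_equiv track=rewrite | github.com/mberjans/cspirit_ontology_information_extraction_Opus4plan | aim2_project/aim2_ontology/parsers/citation_formats/base_handler.py | _extract_author_names
-- ===== SOURCE A (Python) =====
-- from typing import Any, Dict, List, Optional
--
-- def _extract_author_names(author_text: str) -> List[str]:
--     """
--     Extract individual author names from author text.
--
--     This is a basic implementation that can be overridden by subclasses
--     for format-specific author parsing.
--
--     Args:
--         author_text: Text containing author names
--
--     Returns:
--         List of individual author names
--     """
--     if not author_text:
--         return []
--
--     # Split on common separators
--     separators = [" and ", " & ", ";", ","]
--     authors = [author_text]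
--
--     for separator in separators:
--         new_authors = []
--         for author in authors:
--             new_authors.extend(part.strip() for part in author.split(separator))
--         authors = new_authors
--
--     # Filter out empty strings and clean up
--     authors = [author.strip() for author in authors if author.strip()]
--
--     return authors
-- ===== SOURCE B (Python) =====
-- from typing import List
--
-- def _extract_author_names(author_text: str) -> List[str]:
--     if not author_text:
--         return []
--
--     def split_rec(text: str, seps: List[str]) -> List[str]:
--         if not seps:
--             return [text] if text else []
--         return [name
--                 for part in text.split(seps[0])
--                 for name in split_rec(part.strip(), seps[1:])]
--
--     return split_rec(author_text, [" and ", " & ", ";", ","])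
-- ===== Notes on version B (the rewrite author's own statement) =====
-- stated objective: simpler
-- what changed: Replaces the iterative separator loop with its inner authors loop and new_authors accumulator plus a final strip-and-filter pass by a single recursive flatMap over the separator list whose base case emits the (already stripped) name or drops it if empty, so the final filtering pass disappears.
import Mathlib
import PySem

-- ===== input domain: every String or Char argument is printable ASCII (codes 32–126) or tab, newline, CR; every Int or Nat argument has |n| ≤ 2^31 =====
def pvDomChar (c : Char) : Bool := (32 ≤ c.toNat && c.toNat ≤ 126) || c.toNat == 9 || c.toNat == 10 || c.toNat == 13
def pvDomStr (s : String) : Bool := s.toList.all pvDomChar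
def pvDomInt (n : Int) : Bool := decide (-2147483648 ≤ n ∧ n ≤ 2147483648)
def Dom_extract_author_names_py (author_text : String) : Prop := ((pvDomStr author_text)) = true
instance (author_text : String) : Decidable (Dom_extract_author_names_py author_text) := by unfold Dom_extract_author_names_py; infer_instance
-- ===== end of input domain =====

set_option maxHeartbeats 1000000


-- B replaces the two nested loops plus final strip-and-filter pass by one recursion over the separator list (simpler decomposition, same cost).

-- author.split(sep) for a nonempty literal sep (Python raises only for sep = "", which never occurs here)
def pvSplit (s sep : String) : List String := (PySem.Str.split? s sep).getD []

-- ===== PORT A =====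
def extract_author_names_py (author_text : String) : List String :=
  if author_text = "" then []
  else
    let separators : List String := [" and ", " & ", ";", ","]
    let authors : List String :=
      separators.foldl
        (fun authors separator =>
          authors.foldl
            (fun new_authors author =>
              new_authors ++ (pvSplit author separator).map PySem.Str.strip)
            [])
        [author_text]
    (authors.filter (fun a => PySem.Str.strip a ≠ "")).map PySem.Str.strip

-- ===== PORT B =====
def pvSplitRec (text : String) (seps : List String) : List String :=
  match seps with
  | [] => if text = "" then [] else [text]
  | sep :: rest => (pvSplit text sep).flatMap (fun part => pvSplitRec (PySem.Str.strip part) rest)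

def extract_author_names_py_alt (author_text : String) : List String :=
  if author_text = "" then []
  else pvSplitRec author_text [" and ", " & ", ";", ","]

-- ===== PRECONDITION & SPEC =====
def Spec_extract_author_names_py (author_text : String) (out : List String) : Prop := out = extract_author_names_py_alt author_text
instance (author_text : String) (out : List String) : Decidable (Spec_extract_author_names_py author_text out) := by unfold Spec_extract_author_names_py; infer_instance

-- ===== CLAIM (what is proved, stated in full; the proofs are below) =====
def Claim_equal_extract_author_names_py : Prop := ∀ (author_text : String), Dom_extract_author_names_py author_text → Spec_extract_author_names_py author_text (extract_author_names_py author_text)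

-- ===== LEMMAS AND PROOFS =====

theorem pv_flatMap_congr {α β : Type} (l : List α) (f g : α → List β) (h : ∀ x, f x = g x) :
    l.flatMap f = l.flatMap g := by rw [funext h]

-- intermediate spec: the effect of A's remaining passes plus the final strip-and-filter on one string
def pvG (a : String) (seps : List String) : List String :=
  match seps with
  | [] => if PySem.Str.strip a = "" then [] else [PySem.Str.strip a]
  | sep :: rest => (pvSplit a sep).flatMap (fun p => pvG (PySem.Str.strip p) rest)

theorem pv_lstrip_idem (l : List Char) :
    PySem.Chars.lstrip (PySem.Chars.lstrip l) = PySem.Chars.lstrip l := by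
  simp [PySem.Chars.lstrip, List.dropWhile_idempotent]

theorem pv_rstrip_idem (l : List Char) :
    PySem.Chars.rstrip (PySem.Chars.rstrip l) = PySem.Chars.rstrip l := by
  simp [PySem.Chars.rstrip, List.dropWhile_idempotent]

theorem pv_lstrip_rstrip_lstrip (l : List Char) :
    PySem.Chars.lstrip (PySem.Chars.rstrip (PySem.Chars.lstrip l)) = PySem.Chars.rstrip (PySem.Chars.lstrip l) := by
  -- rstrip keeps a prefix; lstrip's result (if nonempty) starts with a non-space char, so lstrip of the prefix is a no-op
  have hsuf : (PySem.Chars.lstrip l).reverse.dropWhile PySem.Chars.isspace <:+ (PySem.Chars.lstrip l).reverse :=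
    List.dropWhile_suffix _
  rcases hsuf with ⟨u, hu⟩
  have ht : PySem.Chars.rstrip (PySem.Chars.lstrip l) ++ u.reverse = PySem.Chars.lstrip l := by
    have := congrArg List.reverse hu
    simpa [PySem.Chars.rstrip] using this
  cases hr : PySem.Chars.rstrip (PySem.Chars.lstrip l) with
  | nil => simp [PySem.Chars.lstrip]
  | cons a s =>
    have hhead : PySem.Chars.lstrip l = a :: (s ++ u.reverse) := by rw [← ht, hr]; simp
    have : ¬ PySem.Chars.isspace a = true := by
      intro hsp
      have := pv_lstrip_idem l
      rw [hhead] at this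
      simp [PySem.Chars.lstrip, List.dropWhile_cons, hsp] at this
      have hlen := congrArg List.length this
      simp [List.length_append] at hlen
      have h2 := List.length_dropWhile_le (p := PySem.Chars.isspace) (l := s ++ u.reverse)
      simp [List.length_append] at h2
      omega
    simp [PySem.Chars.lstrip, List.dropWhile_cons, this]

theorem pv_strip_idem (s : String) : PySem.Str.strip (PySem.Str.strip s) = PySem.Str.strip s := by
  apply String.toList_injective
  simp only [PySem.Str.toList_strip, PySem.Chars.strip]
  rw [pv_lstrip_rstrip_lstrip, pv_rstrip_idem]

theorem pvG_eq_splitRec (seps : List String) (a : String) (h : PySem.Str.strip a = a) :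
    pvG a seps = pvSplitRec a seps := by
  induction seps generalizing a with
  | nil => simp [pvG, pvSplitRec, h]
  | cons sep rest ih =>
    simp only [pvG, pvSplitRec]
    exact pv_flatMap_congr _ _ _ (fun p => ih _ (pv_strip_idem p))

theorem pvG_eq_splitRec_cons (a sep : String) (rest : List String) :
    pvG a (sep :: rest) = pvSplitRec a (sep :: rest) := by
  simp only [pvG, pvSplitRec]
  exact pv_flatMap_congr _ _ _ (fun p => pvG_eq_splitRec rest _ (pv_strip_idem p))

theorem pv_map_filter_eq_flatMap (t : List String) :
    (t.filter (fun a => PySem.Str.strip a ≠ "")).map PySem.Str.strip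
      = t.flatMap (fun a => if PySem.Str.strip a = "" then [] else [PySem.Str.strip a]) := by
  induction t with
  | nil => simp
  | cons a t iht =>
    simp only [ne_eq] at iht ⊢
    simp only [decide_not] at iht
    by_cases h : PySem.Str.strip a = "" <;> simp [List.filter_cons, h, iht]

theorem pv_finalize_foldl (seps : List String) (authors : List String) :
    ((seps.foldl
        (fun authors separator =>
          authors.foldl
            (fun new_authors author =>
              new_authors ++ (pvSplit author separator).map PySem.Str.strip)
            [])
        authors).filter (fun a => PySem.Str.strip a ≠ "")).map PySem.Str.strip
      = authors.flatMap (fun a => pvG a seps) := by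
  induction seps generalizing authors with
  | nil =>
    simp only [List.foldl_nil]
    rw [pv_map_filter_eq_flatMap]
    exact pv_flatMap_congr _ _ _ (fun a => by simp [pvG])
  | cons sep rest ih =>
    simp only [List.foldl_cons]
    rw [ih, PySem.List.foldl_append_eq_flatMap]
    simp only [List.nil_append, List.flatMap_assoc]
    exact pv_flatMap_congr _ _ _ (fun a => by simp [pvG, List.flatMap_map, Function.comp])

theorem extract_author_names_py_eq (author_text : String) :
    extract_author_names_py author_text = extract_author_names_py_alt author_text := by
  by_cases h : author_text = ""
  · simp [extract_author_names_py, extract_author_names_py_alt, h]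
  · rw [extract_author_names_py, extract_author_names_py_alt, if_neg h, if_neg h]
    rw [pv_finalize_foldl]
    simp only [List.flatMap_cons, List.flatMap_nil, List.append_nil]
    exact pvG_eq_splitRec_cons _ _ _

-- ===== VERDICT (by name: the statement is the Claim_ definition above) =====
theorem extract_author_names_py_spec : Claim_equal_extract_author_names_py := by
  intro a _
  unfold Spec_extract_author_names_py
  exact extract_author_names_py_eq a
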